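-- pv_equiv track=rewrite | github.com/Dinarque/Automatic_feedback_enhancement | pdf_extractor_with_ocr.py | unite_coinciding_strings
-- ===== SOURCE A (Python) =====
-- def unite_coinciding_strings(string1, string2):
--     # Find the common substring
--     common_substring = ""
--     for i in range(len(string1)):
--         for j in range(len(string2)):
--             k = 0
--             while i + k < len(string1) and j + k < len(string2) and string1[i + k] == string2[j + k]:
--                 k += 1
--             if k > len(common_substring):
--                 common_substring = string1[i:i + k]
--
--     if common_substring:
--         # Combine the strings where they coincide
--         result = string1 + string2[len(common_substring):]
--         return result
--     else:
--         # If there's no common substring, simply concatenate the two strings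
--         return string1 + string2
-- ===== SOURCE B (Python) =====
-- def unite_coinciding_strings(string1, string2):
--     # Only the LENGTH of the longest common substring matters for the result,
--     # so compute it with the standard O(n*m) dynamic-programming table
--     # (longest common suffix of prefixes, one rolling row).
--     m = len(string2)
--     best = 0
--     prev = [0] * (m + 1)
--     for ch in string1:
--         cur = [0] * (m + 1)
--         for j in range(m):
--             if ch == string2[j]:
--                 cur[j + 1] = prev[j] + 1
--                 if cur[j + 1] > best:
--                     best = cur[j + 1]
--         prev = cur
--     return string1 + string2[best:]
-- ===== Notes on version B (the rewrite author's own statement) =====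
-- stated objective: faster
-- what changed: A re-scans a character-by-character extension for every index pair and keeps the substring itself; B observes that only the maximal length matters and computes it with the standard longest-common-suffix-of-prefixes DP (one rolling row), then returns string1 + string2[best:].
import Mathlib
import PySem

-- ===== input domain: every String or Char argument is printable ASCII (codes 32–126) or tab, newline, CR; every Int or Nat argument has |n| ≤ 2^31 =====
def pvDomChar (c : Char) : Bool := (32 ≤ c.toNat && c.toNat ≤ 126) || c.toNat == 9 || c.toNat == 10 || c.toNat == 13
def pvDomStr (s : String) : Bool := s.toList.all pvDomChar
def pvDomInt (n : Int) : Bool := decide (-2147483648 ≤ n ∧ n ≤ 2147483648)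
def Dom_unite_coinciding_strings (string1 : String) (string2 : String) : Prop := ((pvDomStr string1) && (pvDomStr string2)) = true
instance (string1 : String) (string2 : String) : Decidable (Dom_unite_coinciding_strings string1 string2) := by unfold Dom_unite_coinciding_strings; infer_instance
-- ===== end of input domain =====

-- B replaces A's cubic scan (re-extending a match at every index pair and keeping the
-- substring itself) by the standard O(n*m) longest-common-substring DP, since only the
-- maximal length matters for the result; objective: faster.

-- ===== PORT A =====
-- the `while` loop of A: count how long the two suffixes keep coinciding
def pvCp : List Char → List Char → Nat
  | x :: xs, y :: ys => if x = y then pvCp xs ys + 1 else 0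
  | _, _ => 0

def unite_coinciding_strings (string1 : String) (string2 : String) : String :=
  let a := string1.toList
  let b := string2.toList
  let common := (List.range a.length).foldl (fun c i =>
      (List.range b.length).foldl (fun c j =>
        let k := pvCp (a.drop i) (b.drop j)
        if c.length < k then (a.drop i).take k else c) c) ([] : List Char)
  if common ≠ [] then String.ofList (a ++ b.drop common.length)
  else String.ofList (a ++ b)

-- ===== PORT B =====
-- one DP row step: cur[j+1] = prev[j]+1 on a match else 0; best picks up the row maximum
def pvStep (b : List Char) (st : List Nat × Nat) (x : Char) : List Nat × Nat :=
  let cur := (b.zip st.1).map (fun yp => if x = yp.1 then yp.2 + 1 else 0)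
  (0 :: cur, max st.2 (cur.foldl max 0))

def unite_coinciding_strings_alt (string1 : String) (string2 : String) : String :=
  let a := string1.toList
  let b := string2.toList
  let st := a.foldl (pvStep b) (List.replicate (b.length + 1) 0, 0)
  String.ofList (a ++ b.drop st.2)

-- ===== PRECONDITION & SPEC =====
def Spec_unite_coinciding_strings (string1 : String) (string2 : String) (out : String) : Prop := out = unite_coinciding_strings_alt string1 string2
instance (string1 : String) (string2 : String) (out : String) : Decidable (Spec_unite_coinciding_strings string1 string2 out) := by unfold Spec_unite_coinciding_strings; infer_instance

-- ===== CLAIM (what is proved, stated in full; the proofs are below) =====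
def Claim_equal_unite_coinciding_strings : Prop := ∀ (string1 : String) (string2 : String), Dom_unite_coinciding_strings string1 string2 → Spec_unite_coinciding_strings string1 string2 (unite_coinciding_strings string1 string2)

-- ===== LEMMAS AND PROOFS =====

-- max of g over {0,…,k-1}, as computed by a foldl
def pvRmax (k : Nat) (g : Nat → Nat) : Nat := (List.range k).foldl (fun v i => max v (g i)) 0

lemma pvRmax_succ (k : Nat) (g : Nat → Nat) : pvRmax (k + 1) g = max (pvRmax k g) (g k) := by
  simp [pvRmax, List.range_succ, List.foldl_append]

lemma pvLe_rmax (k i : Nat) (g : Nat → Nat) (h : i < k) : g i ≤ pvRmax k g := by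
  induction k with
  | zero => omega
  | succ k ih =>
    rw [pvRmax_succ]
    rcases Nat.lt_succ_iff_lt_or_eq.mp h with h' | h'
    · exact le_trans (ih h') (Nat.le_max_left _ _)
    · subst h'; exact Nat.le_max_right _ _

lemma pvRmax_le (k : Nat) (g : Nat → Nat) (s : Nat) (h : ∀ i, i < k → g i ≤ s) : pvRmax k g ≤ s := by
  induction k with
  | zero => simp [pvRmax]
  | succ k ih =>
    rw [pvRmax_succ]
    exact Nat.max_le.mpr ⟨ih (fun i hi => h i (Nat.lt_succ_of_lt hi)), h k (Nat.lt_succ_self k)⟩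

lemma pvRmax_congr (k : Nat) (g g' : Nat → Nat) (h : ∀ i, i < k → g i = g' i) :
    pvRmax k g = pvRmax k g' := by
  induction k with
  | zero => rfl
  | succ k ih =>
    rw [pvRmax_succ, pvRmax_succ, ih (fun i hi => h i (Nat.lt_succ_of_lt hi)), h k (Nat.lt_succ_self k)]

lemma pvRmax_shift (k : Nat) (g : Nat → Nat) :
    pvRmax (k + 1) g = max (g 0) (pvRmax k (fun j => g (j + 1))) := by
  induction k with
  | zero => simp [pvRmax]
  | succ k ih => rw [pvRmax_succ, ih, pvRmax_succ]; omega

lemma pvCp_le_left : ∀ xs ys : List Char, pvCp xs ys ≤ xs.length := by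
  intro xs
  induction xs with
  | nil => intro ys; cases ys <;> simp [pvCp]
  | cons x xs ih =>
    intro ys
    cases ys with
    | nil => simp [pvCp]
    | cons y ys => simp only [pvCp]; split <;> simp [Nat.succ_le_succ (ih ys)]

lemma pvCp_ge_iff : ∀ (xs ys : List Char) (k : Nat),
    k ≤ pvCp xs ys ↔ k ≤ xs.length ∧ k ≤ ys.length ∧ xs.take k = ys.take k := by
  intro xs
  induction xs with
  | nil =>
    intro ys k; cases ys <;> cases k <;> simp [pvCp]
  | cons x xs ih =>
    intro ys k
    cases ys with
    | nil => cases k <;> simp [pvCp]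
    | cons y ys =>
      cases k with
      | zero => simp
      | succ k =>
        simp only [pvCp]
        constructor
        · intro h
          by_cases hxy : x = y
          · simp only [hxy] at h
            have := (ih ys k).mp (Nat.le_of_succ_le_succ h)
            subst hxy
            simpa [List.take_succ_cons, Nat.succ_le_succ_iff] using this
          · simp [hxy] at h
        · rintro ⟨h1, h2, h3⟩
          simp only [List.take_succ_cons, List.cons.injEq] at h3
          obtain ⟨hxy, ht⟩ := h3
          subst hxy
          simp only [if_pos trivial]
          exact Nat.succ_le_succ ((ih ys k).mpr ⟨Nat.le_of_succ_le_succ h1, Nat.le_of_succ_le_succ h2, ht⟩)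

-- the quantities the two programs compute
def pvF (a b : List Char) (i j : Nat) : Nat := pvCp (a.drop i) (b.drop j)
def pvV (a b : List Char) (i j : Nat) : Nat := pvCp ((a.take i).reverse) ((b.take j).reverse)
def pvLA (a b : List Char) : Nat := pvRmax a.length (fun i => pvRmax b.length (fun j => pvF a b i j))
def pvRow (b pre : List Char) : List Nat :=
  (List.range (b.length + 1)).map (fun j => pvCp pre.reverse ((b.take j).reverse))
def pvBest (b pre : List Char) : Nat :=
  pvRmax (pre.length + 1) (fun i => pvRmax (b.length + 1) (fun j => pvV pre b i j))

-- ===== A-side: the length of A's accumulated substring is the running max of the k's =====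
lemma pvInnerLen (a b : List Char) (i : Nat) : ∀ (m : Nat) (c : List Char),
    ((List.range m).foldl (fun c j =>
      if c.length < pvCp (a.drop i) (b.drop j) then (a.drop i).take (pvCp (a.drop i) (b.drop j)) else c) c).length
    = max c.length (pvRmax m (fun j => pvF a b i j)) := by
  intro m
  induction m with
  | zero => intro c; simp [pvRmax]
  | succ m ih =>
    intro c
    rw [List.range_succ, List.foldl_append, pvRmax_succ]
    simp only [List.foldl_cons, List.foldl_nil]
    split
    · rename_i hlt
      rw [ih c] at hlt
      rw [List.length_take]
      have hk : pvCp (a.drop i) (b.drop m) ≤ (a.drop i).length := pvCp_le_left _ _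
      simp only [pvF] at hlt ⊢
      omega
    · rename_i hge
      rw [ih c] at hge ⊢
      simp only [pvF] at hge ⊢
      omega

lemma pvOuterLen (a b : List Char) : ∀ (n : Nat) (c : List Char),
    ((List.range n).foldl (fun c i =>
      (List.range b.length).foldl (fun c j =>
        if c.length < pvCp (a.drop i) (b.drop j) then (a.drop i).take (pvCp (a.drop i) (b.drop j)) else c) c) c).length
    = max c.length (pvRmax n (fun i => pvRmax b.length (fun j => pvF a b i j))) := by
  intro n
  induction n with
  | zero => intro c; simp [pvRmax]
  | succ n ih =>
    intro c
    rw [List.range_succ, List.foldl_append, pvRmax_succ]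
    simp only [List.foldl_cons, List.foldl_nil]
    rw [pvInnerLen a b n (b.length), ih c]
    omega

-- ===== B-side: the row/best invariant of the fold =====
lemma pvRow_nil (b : List Char) : pvRow b [] = List.replicate (b.length + 1) 0 := by
  apply List.ext_getElem <;> simp [pvRow, pvCp]

lemma pvBest_nil (b : List Char) : pvBest b [] = 0 := by
  apply Nat.le_antisymm
  · apply pvRmax_le; intro i _; apply pvRmax_le; intro j _
    simp [pvV, pvCp]
  · exact Nat.zero_le _

lemma pvStep_inv (b l : List Char) (x : Char) :
    pvStep b (pvRow b l, pvBest b l) x = (pvRow b (l ++ [x]), pvBest b (l ++ [x])) := by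
  have hcur : (b.zip (pvRow b l)).map (fun yp => if x = yp.1 then yp.2 + 1 else 0)
      = (List.range b.length).map (fun j => pvCp (x :: l.reverse) ((b.take (j + 1)).reverse)) := by
    apply List.ext_getElem
    · simp [pvRow]
    · intro j h1 h2
      simp only [List.getElem_map, List.getElem_zip, List.getElem_range, pvRow]
      have hj : j < b.length := by simpa [pvRow] using h1
      have htake : b.take (j + 1) = b.take j ++ [b[j]] := by
        rw [List.take_add_one]; simp [List.getElem?_eq_getElem hj]
      rw [htake, List.reverse_append]
      simp [pvCp]
  have hrow : pvRow b (l ++ [x]) = 0 ::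
      (List.range b.length).map (fun j => pvCp (x :: l.reverse) ((b.take (j + 1)).reverse)) := by
    unfold pvRow
    rw [List.range_succ_eq_map]
    simp only [List.map_cons, List.map_map]
    congr 1
    · simp [pvCp]
    · simp [Function.comp, List.reverse_append, Nat.succ_eq_add_one]
  have hbest : pvBest b (l ++ [x]) = max (pvBest b l)
      (((List.range b.length).map (fun j => pvCp (x :: l.reverse) ((b.take (j + 1)).reverse))).foldl max 0) := by
    have hmapfold : (((List.range b.length).map (fun j => pvCp (x :: l.reverse) ((b.take (j + 1)).reverse))).foldl max 0)
        = pvRmax b.length (fun j => pvCp (x :: l.reverse) ((b.take (j + 1)).reverse)) := by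
      rw [List.foldl_map]
      rfl
    rw [hmapfold]
    unfold pvBest
    have hlen2 : (l ++ [x]).length + 1 = (l.length + 1) + 1 := by simp
    rw [hlen2, pvRmax_succ]
    congr 1
    · apply pvRmax_congr
      intro i hi
      apply pvRmax_congr
      intro j _
      unfold pvV
      rw [List.take_append_of_le_length (by omega)]
    · have htop : ∀ j, pvV (l ++ [x]) b (l.length + 1) j = pvCp (x :: l.reverse) ((b.take j).reverse) := by
        intro j
        unfold pvV
        rw [List.take_of_length_le (by simp), List.reverse_append]
        rfl
      rw [pvRmax_congr _ _ _ (fun j _ => htop j), pvRmax_shift]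
      simp [pvCp]
  rw [pvStep]
  simp only [hcur, hrow, hbest]

lemma pvFoldB (b : List Char) : ∀ (l : List Char),
    l.foldl (pvStep b) (List.replicate (b.length + 1) 0, 0) = (pvRow b l, pvBest b l) := by
  intro l
  induction l using List.reverseRecOn with
  | nil => simp [pvRow_nil, pvBest_nil]
  | append_singleton l x ih =>
    rw [List.foldl_append, ih]
    simp only [List.foldl_cons, List.foldl_nil]
    exact pvStep_inv b l x

-- ===== the two maxima coincide =====
lemma pvT1 (a b : List Char) (i j : Nat) (hi : i < a.length) (hj : j < b.length) :
    pvF a b i j ≤ pvBest b a := by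
  set k := pvF a b i j with hk
  obtain ⟨h1, h2, h3⟩ := (pvCp_ge_iff (a.drop i) (b.drop j) k).mp (le_of_eq hk)
  rw [List.length_drop] at h1
  rw [List.length_drop] at h2
  have hvk : k ≤ pvV a b (i + k) (j + k) := by
    apply (pvCp_ge_iff _ _ k).mpr
    refine ⟨by simp; omega, by simp; omega, ?_⟩
    have ha : (a.take (i + k)).reverse.take k = ((a.drop i).take k).reverse := by
      rw [List.take_reverse]
      congr 1
      rw [List.length_take, Nat.min_eq_left (by omega)]
      have : i + k - k = i := by omega
      rw [this, List.drop_take]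
      congr 1
      omega
    have hb : (b.take (j + k)).reverse.take k = ((b.drop j).take k).reverse := by
      rw [List.take_reverse]
      congr 1
      rw [List.length_take, Nat.min_eq_left (by omega)]
      have : j + k - k = j := by omega
      rw [this, List.drop_take]
      congr 1
      omega
    rw [ha, hb, h3]
  calc k ≤ pvV a b (i + k) (j + k) := hvk
    _ ≤ pvRmax (b.length + 1) (fun j' => pvV a b (i + k) j') :=
        pvLe_rmax (b.length + 1) (j + k) (fun j' => pvV a b (i + k) j') (by omega)
    _ ≤ pvBest b a :=
        pvLe_rmax (a.length + 1) (i + k)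
          (fun i' => pvRmax (b.length + 1) (fun j' => pvV a b i' j')) (by omega)

lemma pvT2 (a b : List Char) (i j : Nat) (hi : i ≤ a.length) (hj : j ≤ b.length) :
    pvV a b i j ≤ pvLA a b := by
  set k := pvV a b i j with hk
  rcases Nat.eq_zero_or_pos k with h0 | hpos
  · omega
  obtain ⟨h1, h2, h3⟩ := (pvCp_ge_iff ((a.take i).reverse) ((b.take j).reverse) k).mp (le_of_eq hk)
  simp only [List.length_reverse, List.length_take] at h1 h2
  have hki : k ≤ i := by omega
  have hkj : k ≤ j := by omega
  have hfk : k ≤ pvF a b (i - k) (j - k) := by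
    apply (pvCp_ge_iff _ _ k).mpr
    refine ⟨by rw [List.length_drop]; omega, by rw [List.length_drop]; omega, ?_⟩
    have ha : (a.drop (i - k)).take k = ((a.take i).reverse.take k).reverse := by
      rw [List.take_reverse, List.reverse_reverse]
      rw [List.length_take, Nat.min_eq_left hi, List.drop_take]
      congr 1
      omega
    have hb : (b.drop (j - k)).take k = ((b.take j).reverse.take k).reverse := by
      rw [List.take_reverse, List.reverse_reverse]
      rw [List.length_take, Nat.min_eq_left hj, List.drop_take]
      congr 1
      omega
    rw [ha, hb, h3]
  calc k ≤ pvF a b (i - k) (j - k) := hfk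
    _ ≤ pvRmax b.length (fun j' => pvF a b (i - k) j') :=
        pvLe_rmax b.length (j - k) (fun j' => pvF a b (i - k) j') (by omega)
    _ ≤ pvLA a b :=
        pvLe_rmax a.length (i - k)
          (fun i' => pvRmax b.length (fun j' => pvF a b i' j')) (by omega)

lemma pvLA_eq_best (a b : List Char) : pvLA a b = pvBest b a := by
  apply Nat.le_antisymm
  · apply pvRmax_le; intro i hi; apply pvRmax_le; intro j hj
    exact pvT1 a b i j hi hj
  · apply pvRmax_le; intro i hi; apply pvRmax_le; intro j hj
    exact pvT2 a b i j (by omega) (by omega)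

-- ===== VERDICT (by name: the statement is the Claim_ definition above) =====
theorem unite_coinciding_strings_spec : Claim_equal_unite_coinciding_strings := by
  intro s1 s2 _
  simp only [Spec_unite_coinciding_strings, unite_coinciding_strings, unite_coinciding_strings_alt]
  rw [pvFoldB s2.toList s1.toList]
  have hlen : ((List.range s1.toList.length).foldl (fun c i =>
      (List.range s2.toList.length).foldl (fun c j =>
        if c.length < pvCp (s1.toList.drop i) (s2.toList.drop j) then
          (s1.toList.drop i).take (pvCp (s1.toList.drop i) (s2.toList.drop j)) else c) c)
      ([] : List Char)).length = pvBest s2.toList s1.toList := by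
    rw [pvOuterLen s1.toList s2.toList s1.toList.length ([] : List Char)]
    simp only [List.length_nil, Nat.max_eq_right (Nat.zero_le _)]
    exact pvLA_eq_best s1.toList s2.toList
  split
  · rw [hlen]
  · rename_i hne
    rw [not_not] at hne
    have h0 : pvBest s2.toList s1.toList = 0 := by rw [← hlen, hne]; rfl
    simp [h0]
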